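-- pv_equiv track=rewrite | github.com/harrisonbarlow/aoc | 2021/day07/main.py | solve3
-- ===== SOURCE A (Python) =====
-- def triangle(n):
--     return int((n**2 + n) / 2)
--
-- def solve3(crabs):
--     left = min(crabs)
--     right = max(crabs)
--
--     while left < right:
--         mid = (left + right) // 2
--
--         cost = sum(triangle(abs(mid - i)) for i in crabs)
--         cost_right = sum(triangle(abs(mid + 1 - i)) for i in crabs)
--
--         best = min(cost, cost_right)
--
--         if cost_right >= cost:
--             right = mid - 1
--         else:
--             left = mid + 1
--
--     return best
-- ===== SOURCE B (Python) =====
-- def _bisect_right(s, x):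
--     # index of the first element of sorted s that is > x (= bisect.bisect_right)
--     lo, hi = 0, len(s)
--     while lo < hi:
--         mid = (lo + hi) // 2
--         if x < s[mid]:
--             hi = mid
--         else:
--             lo = mid + 1
--     return lo
--
--
-- def solve3(crabs):
--     s = sorted(crabs)
--     n = len(s)
--     pre1 = [0]  # pre1[k] = sum of the k smallest crabs
--     pre2 = [0]  # pre2[k] = sum of their squares
--     for c in s:
--         pre1.append(pre1[-1] + c)
--         pre2.append(pre2[-1] + c * c)
--
--     def cost(m):
--         # sum of triangle(|m - c|) over all crabs, in O(log n) via prefix sums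
--         k = _bisect_right(s, m)
--         s1l, s2l = pre1[k], pre2[k]
--         s1r, s2r = pre1[n] - s1l, pre2[n] - s2l
--         left_part = k * (m * m + m) - (2 * m + 1) * s1l + s2l
--         right_part = (n - k) * (m * m - m) - (2 * m - 1) * s1r + s2r
--         return (left_part + right_part) // 2
--
--     left = s[0]
--     right = s[-1]
--     best = 0
--     while left < right:
--         mid = (left + right) // 2
--         c0 = cost(mid)
--         c1 = cost(mid + 1)
--         best = min(c0, c1)
--         if c1 >= c0:
--             right = mid - 1
--         else:
--             left = mid + 1
--     return best
-- ===== Notes on version B (the rewrite author's own statement) =====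
-- stated objective: faster
-- what changed: B sorts the crabs once and precomputes prefix sums of values and squares, so each binary-search probe's total triangle cost is an O(log n) bisect plus a closed-form expression instead of A's O(n) pass summing triangle(abs(m-c)) per crab; the binary-search path itself is unchanged.
-- outside the precondition, e.g. on solve3([5, 5]): A raises UnboundLocalError, B returns 0; on solve3([0, 2147483647]): A returns 1152921504606851328, B returns 1152921504606846978; on solve3([1000000007, -1000000007]): A returns 1000000015000000832, B returns 1000000015000000057
import Mathlib
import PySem

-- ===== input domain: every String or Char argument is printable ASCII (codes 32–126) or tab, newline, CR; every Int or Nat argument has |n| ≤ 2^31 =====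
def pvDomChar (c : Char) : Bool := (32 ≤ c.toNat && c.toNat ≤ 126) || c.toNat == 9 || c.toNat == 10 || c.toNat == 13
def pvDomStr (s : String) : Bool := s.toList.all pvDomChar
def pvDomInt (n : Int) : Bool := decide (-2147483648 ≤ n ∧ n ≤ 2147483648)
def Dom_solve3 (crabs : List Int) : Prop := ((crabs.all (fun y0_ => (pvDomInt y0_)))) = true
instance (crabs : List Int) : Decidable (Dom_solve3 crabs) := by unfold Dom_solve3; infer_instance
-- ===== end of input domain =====

-- B replaces A's O(n)-per-probe cost sums by O(log n) prefix-sum lookups over the sorted list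
-- (sort + prefix sums of values and squares, bisect per probe) along the same binary-search path.

-- ===== PORT A =====

-- int((n**2 + n)/2): n**2 + n is even and, on Pre_-admitted inputs, < 2^54, where Python's
-- float true division is exact; ported as exact integer division.
def triangle (n : Int) : Int := (n ^ 2 + n) / 2

-- the while-loop of A; state (left, right, best)
def solve3Loop (crabs : List Int) (left right best : Int) : Int :=
  if _h : left < right then
    let mid := PySem.Int.floordiv (left + right) 2
    let cost := (crabs.map (fun i => triangle |mid - i|)).sum
    let cost_right := (crabs.map (fun i => triangle |mid + 1 - i|)).sum
    let best' := min cost cost_right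
    if cost_right ≥ cost then solve3Loop crabs left (mid - 1) best'
    else solve3Loop crabs (mid + 1) right best'
  else best
termination_by (right + 1 - left).toNat
decreasing_by
  · have := PySem.Int.floordiv_two_mid_bounds (le_of_lt _h)
    omega
  · have := PySem.Int.floordiv_two_mid_bounds (le_of_lt _h)
    omega

def solve3 (crabs : List Int) : Int :=
  let left := (PySem.List.min? crabs (fun x => x)).getD 0   -- min(crabs); [] (ValueError) is outside Pre_
  let right := (PySem.List.max? crabs (fun x => x)).getD 0  -- max(crabs)
  -- `best` is unbound before the loop; Pre_ guarantees at least one iteration, so the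
  -- initial value 0 is never returned on admitted inputs (UnboundLocalError is outside Pre_)
  solve3Loop crabs left right 0

-- ===== PORT B =====

-- _bisect_right(s, x): hand-written bisect_right, the same lo/hi halving loop as
-- PySem.List.bisectRight, which is its step-for-step port
def countLe (s : List Int) (x : Int) : Nat := PySem.List.bisectRight s x

-- cost(m) of Source B: O(log n) via the prefix sums; k, s1l/s2l, s1r/s2r, two parts, // 2
def costAlt (s pre1 pre2 : List Int) (n : Nat) (m : Int) : Int :=
  let k := countLe s m
  let s1l := pre1.getD k 0           -- pre1[k]; 0 ≤ k ≤ n is always in range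
  let s2l := pre2.getD k 0
  let s1r := pre1.getD n 0 - s1l
  let s2r := pre2.getD n 0 - s2l
  let left_part := (k : Int) * (m * m + m) - (2 * m + 1) * s1l + s2l
  let right_part := ((n : Int) - (k : Int)) * (m * m - m) - (2 * m - 1) * s1r + s2r
  PySem.Int.floordiv (left_part + right_part) 2

-- the while-loop of Source B; same state (left, right, best)
def solve3AltLoop (s pre1 pre2 : List Int) (n : Nat) (left right best : Int) : Int :=
  if _h : left < right then
    let mid := PySem.Int.floordiv (left + right) 2
    let c0 := costAlt s pre1 pre2 n mid
    let c1 := costAlt s pre1 pre2 n (mid + 1)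
    let best' := min c0 c1
    if c1 ≥ c0 then solve3AltLoop s pre1 pre2 n left (mid - 1) best'
    else solve3AltLoop s pre1 pre2 n (mid + 1) right best'
  else best
termination_by (right + 1 - left).toNat
decreasing_by
  · have := PySem.Int.floordiv_two_mid_bounds (le_of_lt _h)
    omega
  · have := PySem.Int.floordiv_two_mid_bounds (le_of_lt _h)
    omega

def solve3_alt (crabs : List Int) : Int :=
  let s := PySem.List.sorted crabs (fun x => x) false
  let n := s.length
  -- pre1 = [0]; for c in s: pre1.append(pre1[-1] + c)  — a running-sum scan; likewise pre2 with c*c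
  let pre1 := List.scanl (fun a c => a + c) 0 s
  let pre2 := List.scanl (fun a c => a + c * c) 0 s
  let left := PySem.List.pyGetD s 0 0      -- s[0];  [] (IndexError) is outside Pre_
  let right := PySem.List.pyGetD s (-1) 0  -- s[-1]
  solve3AltLoop s pre1 pre2 n left right 0

-- ===== PRECONDITION & SPEC =====

-- Pre_ excludes inputs on which A raises — the empty list (min() raises ValueError) and
-- all-equal lists (the loop body never runs, so `return best` raises UnboundLocalError) —
-- and inputs with max-min spread > 134217726, on which A still returns but its triangle's
-- float division int((n**2+n)/2) rounds (n**2+n can reach 2^54), so A's totals are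
-- float-rounding artefacts that no exact-integer implementation can reproduce.
def Pre_solve3 (crabs : List Int) : Prop :=
  crabs ≠ [] ∧
  (PySem.List.min? crabs (fun x => x)).getD 0 < (PySem.List.max? crabs (fun x => x)).getD 0 ∧
  (PySem.List.max? crabs (fun x => x)).getD 0 - (PySem.List.min? crabs (fun x => x)).getD 0 ≤ 134217726

instance (crabs : List Int) : Decidable (Pre_solve3 crabs) := by unfold Pre_solve3; infer_instance

def pvWitness_solve3 : List Int := [1, 0, 4, 2, 2]

def Spec_solve3 (crabs : List Int) (out : Int) : Prop := out = solve3_alt crabs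
instance (crabs : List Int) (out : Int) : Decidable (Spec_solve3 crabs out) := by unfold Spec_solve3; infer_instance

-- ===== CLAIM (what is proved, stated in full; the proofs are below) =====
def Claim_equal_solve3 : Prop := ∀ (crabs : List Int), Dom_solve3 crabs → Pre_solve3 crabs → Spec_solve3 crabs (solve3 crabs)

-- ===== LEMMAS AND PROOFS =====

-- 2 * triangle d = d^2 + d  (d^2 + d = d * (d + 1) is even)
theorem two_mul_triangle (d : Int) : 2 * triangle d = d ^ 2 + d := by
  have h : 2 ∣ d ^ 2 + d := by
    have := Int.even_mul_succ_self d
    have h2 : d * (d + 1) = d ^ 2 + d := by ring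
    rw [h2] at this
    exact this.two_dvd
  unfold triangle
  exact Int.mul_ediv_cancel' h

-- getting the k-th running sum out of the scan
theorem scanl_getD (g : Int → Int) (s : List Int) (a : Int) (k : Nat) (hk : k ≤ s.length) :
    (List.scanl (fun x c => x + g c) a s).getD k 0 = a + ((s.take k).map g).sum := by
  induction s generalizing a k with
  | nil =>
    have hk0 : k = 0 := by simpa using hk
    subst hk0
    simp [List.scanl_nil]
  | cons c t ih =>
    cases k with
    | zero => simp [List.scanl_cons]
    | succ k =>
      simp only [List.scanl_cons, List.getD, List.getElem?_cons_succ, List.take_succ_cons,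
        List.map_cons, List.sum_cons]
      have := ih (a + g c) k (by simpa using hk)
      simp only [List.getD] at this
      rw [this]
      ring

-- closed form of twice the triangle-cost sum over a list of values ≤ m
theorem sum_le_side (m : Int) (l : List Int) (hl : ∀ c ∈ l, c ≤ m) :
    2 * ((l.map (fun c => triangle |m - c|)).sum)
      = (l.length : Int) * (m * m + m) - (2 * m + 1) * l.sum + ((l.map (fun c => c * c)).sum) := by
  induction l with
  | nil => simp
  | cons c t ih =>
    have hc : c ≤ m := hl c (by simp)
    have habs : |m - c| = m - c := abs_of_nonneg (by omega)
    have h2 : 2 * triangle |m - c| = (m - c) ^ 2 + (m - c) := by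
      rw [habs]; exact two_mul_triangle (m - c)
    have ih' := ih (fun x hx => hl x (by simp [hx]))
    simp only [List.map_cons, List.sum_cons, List.length_cons]
    push_cast
    linear_combination h2 + ih'

-- closed form of twice the triangle-cost sum over a list of values > m
theorem sum_gt_side (m : Int) (l : List Int) (hl : ∀ c ∈ l, m < c) :
    2 * ((l.map (fun c => triangle |m - c|)).sum)
      = (l.length : Int) * (m * m - m) - (2 * m - 1) * l.sum + ((l.map (fun c => c * c)).sum) := by
  induction l with
  | nil => simp
  | cons c t ih =>
    have hc : m < c := hl c (by simp)
    have habs : |m - c| = c - m := by rw [abs_sub_comm]; exact abs_of_nonneg (by omega)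
    have h2 : 2 * triangle |m - c| = (c - m) ^ 2 + (c - m) := by
      rw [habs]; exact two_mul_triangle (c - m)
    have ih' := ih (fun x hx => hl x (by simp [hx]))
    simp only [List.map_cons, List.sum_cons, List.length_cons]
    push_cast
    linear_combination h2 + ih'

-- in a sorted (≤) list the last element bounds every element
theorem pairwise_le_getLast {l : List Int} (hp : l.Pairwise (· ≤ ·)) (h : l ≠ []) :
    ∀ y ∈ l, y ≤ l.getLast h := by
  induction l with
  | nil => simp at h
  | cons a t ih =>
    intro y hy
    rcases List.eq_nil_or_concat' t with rfl | ht
    · simp at hy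
      simp [hy]
    · have hne : t ≠ [] := by rcases ht with ⟨_, _, rfl⟩; simp
      rw [List.getLast_cons hne]
      rcases List.mem_cons.mp hy with rfl | hyt
      · exact le_trans (le_refl y) (by
          have := List.rel_of_pairwise_cons hp (List.getLast_mem hne)
          exact this)
      · exact ih hp.of_cons hne y hyt

-- B's prefix-sum cost equals A's direct triangle sum, for every probe m
theorem cost_eq (crabs : List Int) (m : Int) :
    costAlt (PySem.List.sorted crabs (fun x => x) false)
      (List.scanl (fun a c => a + c) 0 (PySem.List.sorted crabs (fun x => x) false))
      (List.scanl (fun a c => a + c * c) 0 (PySem.List.sorted crabs (fun x => x) false))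
      (PySem.List.sorted crabs (fun x => x) false).length m
      = (crabs.map (fun i => triangle |m - i|)).sum := by
  set s := PySem.List.sorted crabs (fun x => x) false with hs
  have hpair : s.Pairwise (· ≤ ·) := PySem.List.sorted_pairwise crabs (fun x => x)
  obtain ⟨hkle, hlt, hge⟩ := PySem.List.bisectRight_spec s m hpair
  set k := PySem.List.bisectRight s m with hk
  set n := s.length with hn
  -- the two halves of s around the split point
  have htake : ∀ c ∈ s.take k, c ≤ m := by
    intro c hc
    obtain ⟨j, hj, rfl⟩ := List.getElem_of_mem hc
    have hjk : j < k := by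
      have := hj; simp only [List.length_take] at this; omega
    have hjn : j < n := by
      have := hj; simp only [List.length_take] at this; omega
    have := hlt j hjn hjk
    simpa [List.getElem_take] using this
  have hdrop : ∀ c ∈ s.drop k, m < c := by
    intro c hc
    obtain ⟨j, hj, rfl⟩ := List.getElem_of_mem hc
    have hjn : k + j < n := by
      have := hj; simp only [List.length_drop] at this; omega
    have := hge (k + j) hjn (by omega)
    simpa [List.getElem_drop] using this
  have hlentake : (s.take k).length = k := by simp [List.length_take]; omega
  have hlendrop : (s.drop k).length = n - k := by rw [List.length_drop, ← hn]
  -- prefix-sum lookups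
  have hp1k : (List.scanl (fun a c => a + c) 0 s).getD k 0 = (s.take k).sum := by
    have := scanl_getD (fun c => c) s 0 k hkle
    simpa using this
  have hp2k : (List.scanl (fun a c => a + c * c) 0 s).getD k 0 = ((s.take k).map (fun c => c * c)).sum := by
    have := scanl_getD (fun c => c * c) s 0 k hkle
    simpa using this
  have hp1n : (List.scanl (fun a c => a + c) 0 s).getD n 0 = s.sum := by
    have := scanl_getD (fun c => c) s 0 n (le_of_eq hn)
    simpa [hn, List.take_length] using this
  have hp2n : (List.scanl (fun a c => a + c * c) 0 s).getD n 0 = (s.map (fun c => c * c)).sum := by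
    have := scanl_getD (fun c => c * c) s 0 n (le_of_eq hn)
    simpa [hn, List.take_of_length_le] using this
  -- the split sums
  have hsum : (s.take k).sum + (s.drop k).sum = s.sum := List.sum_take_add_sum_drop s k
  have hsq : ((s.take k).map (fun c => c * c)).sum + ((s.drop k).map (fun c => c * c)).sum
      = (s.map (fun c => c * c)).sum := by
    conv_rhs => rw [← List.take_append_drop k s]
    rw [List.map_append, List.sum_append]
  have htri : ((s.take k).map (fun i => triangle |m - i|)).sum + ((s.drop k).map (fun i => triangle |m - i|)).sum
      = (s.map (fun i => triangle |m - i|)).sum := by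
    conv_rhs => rw [← List.take_append_drop k s]
    rw [List.map_append, List.sum_append]
  have hL := sum_le_side m (s.take k) htake
  have hR := sum_gt_side m (s.drop k) hdrop
  -- B's numerator is twice A's sum
  have htwo : ((k : Int) * (m * m + m) - (2 * m + 1) * ((List.scanl (fun a c => a + c) 0 s).getD k 0)
        + (List.scanl (fun a c => a + c * c) 0 s).getD k 0)
      + (((n : Int) - (k : Int)) * (m * m - m)
        - (2 * m - 1) * ((List.scanl (fun a c => a + c) 0 s).getD n 0 - (List.scanl (fun a c => a + c) 0 s).getD k 0)
        + ((List.scanl (fun a c => a + c * c) 0 s).getD n 0 - (List.scanl (fun a c => a + c * c) 0 s).getD k 0))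
      = 2 * (s.map (fun i => triangle |m - i|)).sum := by
    rw [hp1k, hp2k, hp1n, hp2n]
    rw [← hsum, ← hsq, ← htri]
    rw [hlentake] at hL
    rw [hlendrop] at hR
    have hnk : ((n - k : Nat) : Int) = (n : Int) - (k : Int) := by
      push_cast [Nat.cast_sub hkle]; ring
    rw [hnk] at hR
    linear_combination -hL - hR
  have hperm : (s.map (fun i => triangle |m - i|)).sum = (crabs.map (fun i => triangle |m - i|)).sum :=
    ((PySem.List.sorted_perm crabs (fun x => x) false).map _).sum_eq
  simp only [costAlt, countLe]
  rw [← hk]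
  rw [htwo, hperm, PySem.Int.floordiv_eq_ediv_of_pos (by norm_num : (0:Int) < 2)]
  exact Int.mul_ediv_cancel_left _ (by norm_num)

-- the two loops agree, given that the two cost functions agree pointwise
theorem loop_eq (crabs s pre1 pre2 : List Int) (n : Nat)
    (hc : ∀ m, costAlt s pre1 pre2 n m = (crabs.map (fun i => triangle |m - i|)).sum) :
    ∀ (l r b : Int), solve3Loop crabs l r b = solve3AltLoop s pre1 pre2 n l r b := by
  have key : ∀ (N : Nat) (l r b : Int), (r + 1 - l).toNat ≤ N →
      solve3Loop crabs l r b = solve3AltLoop s pre1 pre2 n l r b := by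
    intro N
    induction N with
    | zero =>
      intro l r b hN
      have hnlt : ¬ l < r := by omega
      rw [solve3Loop, solve3AltLoop]
      simp [hnlt]
    | succ N ih =>
      intro l r b hN
      rw [solve3Loop, solve3AltLoop]
      by_cases hlr : l < r
      · have hm := PySem.Int.floordiv_two_mid_bounds (le_of_lt hlr)
        simp only [hlr, dif_pos, hc]
        split_ifs with hcase
        · exact ih _ _ _ (by omega)
        · exact ih _ _ _ (by omega)
      · simp [hlr]
  intro l r b
  exact key (r + 1 - l).toNat l r b (le_refl _)

-- ===== VERDICT (by name: the statement is the Claim_ definition above) =====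
-- A's min/max start points coincide with B's s[0] / s[-1] on the sorted list
theorem min_eq_head (crabs : List Int) (hne : crabs ≠ []) :
    (PySem.List.min? crabs (fun x => x)).getD 0
      = PySem.List.pyGetD (PySem.List.sorted crabs (fun x => x) false) 0 0 := by
  set s := PySem.List.sorted crabs (fun x => x) false with hs
  have hsne : s ≠ [] := by
    rw [hs, Ne, PySem.List.sorted_eq_nil_iff]; exact hne
  cases hmn : PySem.List.min? crabs (fun x => x) with
  | none => exact absurd ((PySem.List.min?_eq_none_iff crabs _).mp hmn) hne
  | some mn =>
    cases hsc : s with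
    | nil => exact absurd hsc hsne
    | cons a t =>
      have ha : ∀ y ∈ crabs, a ≤ y := PySem.List.key_head_sorted_le crabs (fun x => x) (hs ▸ hsc)
      have hmem : a ∈ crabs := (PySem.List.mem_sorted crabs _ false a).mp (by rw [← hs, hsc]; simp)
      have h1 : mn ≤ a := PySem.List.min?_isMin hmn a hmem
      have h2 : a ≤ mn := ha mn (PySem.List.min?_mem hmn)
      simp [PySem.List.pyGetD_zero_cons]
      omega

theorem max_eq_last (crabs : List Int) (hne : crabs ≠ []) :
    (PySem.List.max? crabs (fun x => x)).getD 0
      = PySem.List.pyGetD (PySem.List.sorted crabs (fun x => x) false) (-1) 0 := by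
  set s := PySem.List.sorted crabs (fun x => x) false with hs
  have hsne : s ≠ [] := by
    rw [hs, Ne, PySem.List.sorted_eq_nil_iff]; exact hne
  cases hmx : PySem.List.max? crabs (fun x => x) with
  | none =>
    exact absurd ((PySem.List.max?_eq_none_iff crabs _).mp hmx) hne
  | some mx =>
    have hpair : s.Pairwise (· ≤ ·) := PySem.List.sorted_pairwise crabs (fun x => x)
    have hlastmem : s.getLast hsne ∈ crabs :=
      (PySem.List.mem_sorted crabs _ false _).mp (List.getLast_mem hsne)
    have h1 : s.getLast hsne ≤ mx := PySem.List.max?_isMax hmx _ hlastmem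
    have hmxs : mx ∈ s := (PySem.List.mem_sorted crabs _ false mx).mpr (PySem.List.max?_mem hmx)
    have h2 : mx ≤ s.getLast hsne := pairwise_le_getLast hpair hsne mx hmxs
    rw [PySem.List.pyGetD_neg_one s 0 hsne]
    simp
    omega

theorem solve3_spec : Claim_equal_solve3 := by
  intro crabs _hdom hpre
  obtain ⟨hne, _hlt, _hsp⟩ := hpre
  show solve3 crabs = solve3_alt crabs
  unfold solve3 solve3_alt
  simp only []
  rw [min_eq_head crabs hne, max_eq_last crabs hne]
  exact loop_eq crabs _ _ _ _ (fun m => cost_eq crabs m) _ _ 0
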